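-- pv_equiv track=rewrite | github.com/Fluci/ring-ruler | ring_ruler/ring_factory.py | transpose_object_matrix
-- ===== SOURCE A (Python) =====
-- def transpose_object_matrix(objects):
--     t = []
--     for objs in objects:
--         for i, obj in enumerate(objs):
--             if len(t) <= i:
--                 t.append([])
--             t[i].append(obj)
--     return t
-- ===== SOURCE B (Python) =====
-- def transpose_object_matrix(objects):
--     m = max((len(r) for r in objects), default=0)
--     return [[row[i] for row in objects if len(row) > i] for i in range(m)]
-- ===== Notes on version B (the rewrite author's own statement) =====
-- stated objective: simpler
-- what changed: B precomputes the maximum row length and builds the result column-by-column with a filtered scan over rows, instead of A's row-by-row fill that lazily grows the column list.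
import Mathlib
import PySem

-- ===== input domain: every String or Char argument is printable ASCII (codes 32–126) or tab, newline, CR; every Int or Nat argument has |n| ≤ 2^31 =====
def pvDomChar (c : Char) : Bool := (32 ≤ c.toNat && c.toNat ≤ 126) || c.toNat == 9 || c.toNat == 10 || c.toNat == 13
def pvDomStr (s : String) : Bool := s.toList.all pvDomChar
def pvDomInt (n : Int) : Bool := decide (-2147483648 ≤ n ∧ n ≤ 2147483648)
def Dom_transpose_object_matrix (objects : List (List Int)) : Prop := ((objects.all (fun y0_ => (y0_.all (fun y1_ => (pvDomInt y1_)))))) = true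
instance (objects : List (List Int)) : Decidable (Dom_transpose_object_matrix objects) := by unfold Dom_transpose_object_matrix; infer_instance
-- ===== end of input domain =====

-- B replaces A's lazy row-by-row fill with a column-first build over the precomputed
-- maximum row width (objective: simpler). Both are total; A mutates nothing observable.

-- ===== PORT A =====
-- t[i].append(obj): walk to index i and append obj to that column (i is always in
-- range when called, after the padding step; Python would raise IndexError otherwise).
def pvAppendAt : List (List Int) → Nat → Int → List (List Int)
  | [], _, _ => []
  | c :: t, 0, o => (c ++ [o]) :: t
  | c :: t, i + 1, o => c :: pvAppendAt t i o

-- the inner `for i, obj in enumerate(objs)` loop, state t, index i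
def pvInner (t : List (List Int)) (i : Nat) (objs : List Int) : List (List Int) :=
  match objs with
  | [] => t
  | obj :: rest =>
    let t' := if t.length ≤ i then t ++ [[]] else t
    pvInner (pvAppendAt t' i obj) (i + 1) rest

def transpose_object_matrix (objects : List (List Int)) : List (List Int) :=
  objects.foldl (fun t objs => pvInner t 0 objs) []

-- ===== PORT B =====
-- m = max((len(r) for r in objects), default=0); then for each column index i,
-- [row[i] for row in objects if len(row) > i]  — r[i]? is some iff i < r.length,
-- so filterMap is exactly the filtered comprehension.
def transpose_object_matrix_alt (objects : List (List Int)) : List (List Int) :=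
  let m := objects.foldl (fun acc r => max acc r.length) 0
  (List.range m).map (fun i => objects.filterMap (fun r => r[i]?))

-- ===== PRECONDITION & SPEC =====
def Spec_transpose_object_matrix (objects : List (List Int)) (out : List (List Int)) : Prop := out = transpose_object_matrix_alt objects
instance (objects : List (List Int)) (out : List (List Int)) : Decidable (Spec_transpose_object_matrix objects out) := by unfold Spec_transpose_object_matrix; infer_instance

-- ===== CLAIM (what is proved, stated in full; the proofs are below) =====
def Claim_equal_transpose_object_matrix : Prop := ∀ (objects : List (List Int)), Dom_transpose_object_matrix objects → Spec_transpose_object_matrix objects (transpose_object_matrix objects)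

-- ===== LEMMAS AND PROOFS =====

-- merging one row into the columns accumulated so far (characterisation of pvInner · 0 ·)
def mergeRow : List (List Int) → List Int → List (List Int)
  | t, [] => t
  | [], o :: rest => [o] :: mergeRow [] rest
  | c :: t, o :: rest => (c ++ [o]) :: mergeRow t rest

lemma pvInner_cons (objs : List Int) (c : List Int) (t : List (List Int)) (i : Nat) :
    pvInner (c :: t) (i + 1) objs = c :: pvInner t i objs := by
  induction objs generalizing c t i with
  | nil => simp [pvInner]
  | cons o rest ih =>
    simp only [pvInner, List.length_cons, Nat.succ_le_succ_iff]
    by_cases h : t.length ≤ i <;>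
      simp [h, List.cons_append, pvAppendAt, ih]

lemma pvInner_zero (objs : List Int) (t : List (List Int)) :
    pvInner t 0 objs = mergeRow t objs := by
  induction objs generalizing t with
  | nil => cases t <;> simp [pvInner, mergeRow]
  | cons o rest ih =>
    cases t with
    | nil => simp [pvInner, pvAppendAt, mergeRow, pvInner_cons, ih]
    | cons c t' => simp [pvInner, pvAppendAt, mergeRow, pvInner_cons, ih]

lemma getElem?_mergeRow (r : List Int) (t : List (List Int)) (i : Nat) :
    (mergeRow t r)[i]? = match t[i]?, r[i]? with
      | some c, some o => some (c ++ [o])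
      | some c, none => some c
      | none, some o => some [o]
      | none, none => none := by
  induction r generalizing t i with
  | nil => cases h : t[i]? <;> simp [mergeRow, h]
  | cons o rest ih =>
    cases t with
    | nil =>
      cases i with
      | zero => simp [mergeRow]
      | succ j => simpa [mergeRow] using ih [] j
    | cons c t' =>
      cases i with
      | zero => simp [mergeRow]
      | succ j => simpa [mergeRow] using ih t' j

lemma le_foldl_max (rs : List (List Int)) (a : Nat) :
    a ≤ rs.foldl (fun acc r => max acc r.length) a := by
  induction rs generalizing a with
  | nil => simp
  | cons r rs ih =>
    exact le_trans (Nat.le_max_left a r.length) (ih _)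

lemma mem_length_le_foldl_max (rs : List (List Int)) (a : Nat) (r : List Int)
    (h : r ∈ rs) : r.length ≤ rs.foldl (fun acc r => max acc r.length) a := by
  induction rs generalizing a with
  | nil => cases h
  | cons s rs ih =>
    rcases List.mem_cons.1 h with h' | h'
    · subst h'
      exact le_trans (Nat.le_max_right a r.length) (le_foldl_max rs _)
    · exact ih _ h'

lemma filterMap_getElem?_eq_nil (rs : List (List Int)) (i : Nat)
    (h : ∀ r ∈ rs, r.length ≤ i) :
    rs.filterMap (fun r => r[i]?) = [] := by
  induction rs with
  | nil => rfl
  | cons r rs ih =>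
    have h1 : r[i]? = none := by
      exact List.getElem?_eq_none (h r (List.mem_cons_self ..))
    simp [h1, ih (fun s hs => h s (List.mem_cons_of_mem _ hs))]

lemma mergeRow_alt (rs : List (List Int)) (r : List Int) :
    mergeRow (transpose_object_matrix_alt rs) r = transpose_object_matrix_alt (rs ++ [r]) := by
  apply List.ext_getElem?
  intro i
  rw [getElem?_mergeRow]
  simp only [transpose_object_matrix_alt, List.foldl_append, List.foldl_cons, List.foldl_nil,
    List.getElem?_map, List.filterMap_append]
  set M : Nat := rs.foldl (fun acc r => max acc r.length) 0 with hM
  have hfr : [r].filterMap (fun s => s[i]?) = (r[i]?).toList := by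
    cases h : r[i]? <;> simp [h]
  by_cases h1 : i < M <;> by_cases h2 : i < r.length
  · have : i < max M r.length := lt_max_of_lt_left h1
    simp [h1, h2, this, hfr]
  · have : i < max M r.length := lt_max_of_lt_left h1
    have hr : r[i]? = none := List.getElem?_eq_none (Nat.le_of_not_lt h2)
    simp [h1, this, hfr, hr]
  · have : i < max M r.length := lt_max_of_lt_right h2
    have hnil : rs.filterMap (fun s => s[i]?) = [] := by
      apply filterMap_getElem?_eq_nil
      intro s hs
      exact le_trans (mem_length_le_foldl_max rs 0 s hs) (Nat.le_of_not_lt h1)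
    simp [h1, h2, this, hfr, hnil]
  · have : ¬ i < max M r.length := by
      omega
    have hr : r[i]? = none := List.getElem?_eq_none (Nat.le_of_not_lt h2)
    simp [h1, this, hr]

lemma foldl_mergeRow_eq_alt (rs : List (List Int)) :
    rs.foldl mergeRow [] = transpose_object_matrix_alt rs := by
  induction rs using List.reverseRecOn with
  | nil => simp [transpose_object_matrix_alt]
  | append_singleton rs r ih =>
    simp [List.foldl_append, ih, mergeRow_alt]

-- ===== VERDICT (by name: the statement is the Claim_ definition above) =====
theorem transpose_object_matrix_spec : Claim_equal_transpose_object_matrix := by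
  intro objects _
  unfold Spec_transpose_object_matrix transpose_object_matrix
  have : (fun (t : List (List Int)) objs => pvInner t 0 objs) = mergeRow :=
    funext fun t => funext fun objs => pvInner_zero objs t
  rw [this, foldl_mergeRow_eq_alt]
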